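-- pv_equiv track=rewrite | github.com/XDEmer0r-L0rd-360-G0d-SlayerXD/Chem_Scripts | empyrical.py | expand_molecule
-- ===== SOURCE A (Python) =====
-- def expand_molecule(molecule: str):
-- 	last = ""
-- 	out = ""
-- 	global_mult = 1
-- 	for a in molecule:
-- 		if last == "":
-- 			try:
-- 				global_mult = int(a)
-- 			except:
-- 				out += a
-- 				last = a
-- 		else:
-- 			try:
-- 				out += last * (int(a) - 1)
-- 			except:
-- 				out += a
-- 				last = a
-- 	return out
-- ===== SOURCE B (Python) =====
-- def expand_molecule(molecule: str):
--     def extra(c):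
--         # extra copies a digit char contributes; str * negative is empty in Python, hence the clamp
--         try:
--             return max(int(c) - 1, 0)
--         except:
--             return None
--     groups = []
--     pending = 0
--     for c in reversed(molecule):
--         e = extra(c)
--         if e is not None:
--             pending += e
--         else:
--             groups.append(c * (1 + pending))
--             pending = 0
--     # any leftover `pending` belongs to the leading digit-prefix, which produces no output
--     return "".join(reversed(groups))
-- ===== Notes on version B (the rewrite author's own statement) =====
-- stated objective: alternative
-- what changed: B traverses the string right-to-left, accumulating each digit run into a pending count that is attached to the first letter met to its left and emitted as one group, building the output back-to-front; A is a left-to-right state machine threading the last-seen letter and appending per digit.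
import Mathlib
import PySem

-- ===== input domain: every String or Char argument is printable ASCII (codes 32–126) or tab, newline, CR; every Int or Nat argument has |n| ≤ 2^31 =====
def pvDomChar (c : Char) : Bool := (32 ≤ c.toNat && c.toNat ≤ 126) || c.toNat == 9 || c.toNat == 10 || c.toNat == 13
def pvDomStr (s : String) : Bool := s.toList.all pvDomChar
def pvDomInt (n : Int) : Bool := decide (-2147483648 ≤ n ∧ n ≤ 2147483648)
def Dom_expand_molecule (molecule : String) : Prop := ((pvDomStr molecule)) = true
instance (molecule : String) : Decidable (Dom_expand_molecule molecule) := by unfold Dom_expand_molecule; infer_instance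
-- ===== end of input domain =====

-- B traverses the string right-to-left, attaching each digit run's pending count to the first
-- letter met on its left and emitting a whole group at once (output built back-to-front);
-- alternative decomposition, not faster.

-- `try: int(a)` on a single printable-ASCII char succeeds exactly for '0'..'9' (exact on Dom).
def pyIsIntChar (c : Char) : Bool := '0' ≤ c && c ≤ '9'

-- max(int(c) - 1, 0) for a digit char, as Nat truncated subtraction
def pyExtra (c : Char) : Nat := c.toNat - '0'.toNat - 1

-- ===== PORT A =====
-- A's loop state: `last` (empty or one char) and `out`; `global_mult` is assigned but never read, dropped.
-- `last * (int(a) - 1)`: Python str * k is empty for k ≤ 0, matched by Nat truncated subtraction.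
def expandA_loop : List Char → List Char → List Char → List Char
  | [], _, out => out
  | a :: rest, last, out =>
    if last = [] then
      if pyIsIntChar a then expandA_loop rest last out
      else expandA_loop rest [a] (out ++ [a])
    else
      if pyIsIntChar a then
        expandA_loop rest last (out ++ (List.replicate (pyExtra a) last).flatten)
      else expandA_loop rest [a] (out ++ [a])

def expand_molecule (molecule : String) : String :=
  String.ofList (expandA_loop molecule.toList [] [])

-- ===== PORT B =====
-- `for c in reversed(molecule)` with state (pending, groups); groups are appended and the
-- list reversed at the end (back-to-front construction).
def revLoop : List Char → Nat → List (List Char) → Nat × List (List Char)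
  | [], pending, groups => (pending, groups)
  | c :: rest, pending, groups =>
    if pyIsIntChar c then revLoop rest (pending + pyExtra c) groups
    else revLoop rest 0 (groups ++ [List.replicate (1 + pending) c])

def expand_molecule_alt (molecule : String) : String :=
  String.ofList ((revLoop molecule.toList.reverse 0 []).2.reverse.flatten)

-- ===== PRECONDITION & SPEC =====
def Spec_expand_molecule (molecule : String) (out : String) : Prop := out = expand_molecule_alt molecule
instance (molecule : String) (out : String) : Decidable (Spec_expand_molecule molecule out) := by unfold Spec_expand_molecule; infer_instance

-- ===== CLAIM (what is proved, stated in full; the proofs are below) =====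
def Claim_equal_expand_molecule : Prop := ∀ (molecule : String), Dom_expand_molecule molecule → Spec_expand_molecule molecule (expand_molecule molecule)

-- ===== LEMMAS AND PROOFS =====

-- total extra copies contributed by a run of digit chars
def sumExtra (l : List Char) : Nat := (l.map pyExtra).sum

-- common specification both ports are reduced to: skip leading digits, then emit each
-- letter with one copy per unit in its following digit run
def goSpec : List Char → List Char
  | [] => []
  | c :: rest =>
    if pyIsIntChar c then goSpec rest
    else List.replicate (1 + sumExtra (rest.takeWhile pyIsIntChar)) c ++ goSpec (rest.dropWhile pyIsIntChar)
termination_by l => l.length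
decreasing_by
  · simp
  · have := List.length_dropWhile_le (p := pyIsIntChar) (l := rest); simp; omega

theorem sumExtra_cons (a : Char) (l : List Char) :
    sumExtra (a :: l) = pyExtra a + sumExtra l := by simp [sumExtra]

theorem flatten_replicate_single (n : Nat) (c : Char) :
    (List.replicate n [c]).flatten = List.replicate n c := by
  induction n with
  | zero => rfl
  | succ k ih => simp [List.replicate_succ, ih]

theorem lemA (l : List Char) : ∀ (c : Char) (out : List Char),
    expandA_loop l [c] out
      = out ++ List.replicate (sumExtra (l.takeWhile pyIsIntChar)) c
            ++ goSpec (l.dropWhile pyIsIntChar) := by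
  induction l with
  | nil => intro c out; simp [expandA_loop, sumExtra, goSpec]
  | cons a rest ih =>
    intro c out
    by_cases h : pyIsIntChar a = true
    · simp only [expandA_loop, h, reduceCtorEq, if_false, if_true, List.takeWhile_cons,
        List.dropWhile_cons]
      rw [flatten_replicate_single, ih c, sumExtra_cons, List.replicate_add]
      simp only [List.append_assoc]
    · simp only [expandA_loop, h, reduceCtorEq, List.takeWhile_cons,
        List.dropWhile_cons, Bool.false_eq_true]
      rw [ih a]
      simp [goSpec, h, sumExtra, List.replicate_succ, Nat.add_comm]

theorem A_eq_go (l : List Char) : expandA_loop l [] [] = goSpec l := by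
  induction l with
  | nil => simp [expandA_loop, goSpec]
  | cons a rest ih =>
    by_cases h : pyIsIntChar a = true
    · simpa [expandA_loop, goSpec, h] using ih
    · rw [show expandA_loop (a :: rest) [] [] = expandA_loop rest [a] [a] from by
            simp [expandA_loop, h]]
      rw [lemA rest a [a]]
      simp [goSpec, h, List.replicate_succ, Nat.add_comm]

theorem revLoop_append (xs ys : List Char) (p : Nat) (g : List (List Char)) :
    revLoop (xs ++ ys) p g = revLoop ys (revLoop xs p g).1 (revLoop xs p g).2 := by
  induction xs generalizing p g with
  | nil => rfl
  | cons x xt ih =>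
    by_cases h : pyIsIntChar x = true
    · simp [revLoop, h, ih]
    · simp [revLoop, h, ih]

theorem B_inv (l : List Char) :
    (revLoop l.reverse 0 []).1 = sumExtra (l.takeWhile pyIsIntChar) ∧
    (revLoop l.reverse 0 []).2.reverse.flatten = goSpec (l.dropWhile pyIsIntChar) := by
  induction l with
  | nil => exact ⟨rfl, by simp [revLoop, goSpec]⟩
  | cons c rest ih =>
    obtain ⟨ih1, ih2⟩ := ih
    rw [List.reverse_cons, revLoop_append]
    by_cases h : pyIsIntChar c = true
    · constructor
      · simp [revLoop, h, ih1, sumExtra, Nat.add_comm]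
      · simpa [revLoop, h] using ih2
    · constructor
      · simp [revLoop, h, sumExtra]
      · simp [revLoop, h, goSpec, ih1, ih2, List.replicate_succ, Nat.add_comm]

theorem go_dropWhile (l : List Char) : goSpec l = goSpec (l.dropWhile pyIsIntChar) := by
  induction l with
  | nil => rfl
  | cons c rest ih =>
    by_cases h : pyIsIntChar c = true
    · simp only [goSpec, h, List.dropWhile_cons, if_pos]
      exact ih
    · simp [h]

-- ===== VERDICT (by name: the statement is the Claim_ definition above) =====
theorem expand_molecule_spec : Claim_equal_expand_molecule := by
  intro molecule _
  unfold Spec_expand_molecule expand_molecule expand_molecule_alt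
  rw [A_eq_go, (B_inv molecule.toList).2, go_dropWhile]
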